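-- pv_equiv track=rewrite | github.com/woosung-na/AI-SERVICE_MiniProject | agents/formatting_node.py | _fix_markdown_tables
-- ===== SOURCE A (Python) =====
-- def _fix_markdown_tables(text: str) -> str:
--     """헤더 행 직후에만 구분선 삽입 (데이터 행 사이 삽입 방지)"""
--     lines = text.split('\n')
--     result = []
--     for i, line in enumerate(lines):
--         result.append(line)
--         if '|' in line and i + 1 < len(lines):
--             next_line = lines[i + 1]
--             prev_line = lines[i - 1] if i > 0 else ''
--             is_first_table_row = '|' not in prev_line
--             if (is_first_table_row
--                     and '|' in next_line
--                     and '---' not in next_line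
--                     and '---' not in line):
--                 cols = line.count('|') - 1
--                 result.append('|' + '---|' * max(cols, 1))
--     return '\n'.join(result)
-- ===== SOURCE B (Python) =====
-- def _fix_markdown_tables(text: str) -> str:
--     """Block-based rewrite: group consecutive '|' lines, insert the separator
--     after the first row of each multi-row table block when neither of the
--     first two rows contains '---'."""
--     lines = text.split('\n')
--     out = []
--     i = 0
--     n = len(lines)
--     while i < n:
--         if '|' not in lines[i]:
--             out.append(lines[i])
--             i += 1
--             continue
--         # maximal block of consecutive pipe lines
--         j = i
--         while j < n and '|' in lines[j]:
--             j += 1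
--         block = lines[i:j]
--         out.append(block[0])
--         if len(block) >= 2 and '---' not in block[0] and '---' not in block[1]:
--             out.append('|' + '---|' * max(block[0].count('|') - 1, 1))
--         out.extend(block[1:])
--         i = j
--     return '\n'.join(out)
-- ===== Notes on version B (the rewrite author's own statement) =====
-- stated objective: alternative
-- what changed: B first groups the split lines into maximal blocks of consecutive pipe-containing lines and emits each block at once (separator row after a block's first line when the block has a second line and neither of the first two lines contains a dash run), instead of A's per-index loop that re-reads the previous and next line for every line.
import Mathlib
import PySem

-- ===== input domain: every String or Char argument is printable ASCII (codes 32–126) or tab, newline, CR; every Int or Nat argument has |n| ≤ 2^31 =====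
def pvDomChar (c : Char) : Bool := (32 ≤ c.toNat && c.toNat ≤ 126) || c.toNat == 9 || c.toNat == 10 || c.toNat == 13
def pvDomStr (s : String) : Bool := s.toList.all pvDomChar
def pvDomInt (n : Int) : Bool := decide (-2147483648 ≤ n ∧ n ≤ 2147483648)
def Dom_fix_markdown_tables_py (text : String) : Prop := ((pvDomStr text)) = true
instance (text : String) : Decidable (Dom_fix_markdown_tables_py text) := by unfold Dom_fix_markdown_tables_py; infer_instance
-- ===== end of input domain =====

-- B regroups the work by maximal blocks of consecutive pipe-containing lines instead of A's
-- per-index prev/next lookups; same cost, different decomposition ("alternative").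

-- shared separator builder: both Pythons contain the literal expression
-- '|' + '---|' * max(line.count('|') - 1, 1)
def pvSep (line : String) : String :=
  String.ofList ('|' :: PySem.List.pyRepeat ['-', '-', '-', '|'] (max ((PySem.Str.count line "|" : Int) - 1) 1))

-- ===== PORT A =====
def fix_markdown_tables_py (text : String) : String :=
  let lines := (PySem.Str.split? text "\n").getD []
  let result := (PySem.List.enumerate lines 0).foldl (fun result p =>
    let i := p.1
    let line := p.2
    let result := result ++ [line]
    if PySem.Str.isIn "|" line && decide (i + 1 < (lines.length : Int)) then
      let next_line := PySem.List.pyGetD lines (i + 1) ""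
      let prev_line := if i > 0 then PySem.List.pyGetD lines (i - 1) "" else ""
      let is_first_table_row := !PySem.Str.isIn "|" prev_line
      if is_first_table_row && PySem.Str.isIn "|" next_line
          && !PySem.Str.isIn "---" next_line && !PySem.Str.isIn "---" line then
        result ++ [pvSep line]
      else result
    else result) []
  PySem.Str.join "\n" result

-- ===== PORT B =====
def pvPipe (l : String) : Bool := PySem.Str.isIn "|" l
def pvDash (l : String) : Bool := PySem.Str.isIn "---" l

def pvLoopB : List String → List String
  | [] => []
  | l :: ls =>
    if pvPipe l then
      -- maximal block of consecutive pipe lines is l :: blockTail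
      let blockTail := ls.takeWhile pvPipe
      let rest := ls.dropWhile pvPipe
      let sepPart : List String :=
        match blockTail with
        | [] => []
        | second :: _ => if !pvDash l && !pvDash second then [pvSep l] else []
      l :: (sepPart ++ blockTail) ++ pvLoopB rest
    else l :: pvLoopB ls
termination_by ls => ls.length
decreasing_by
  · have := List.length_dropWhile_le pvPipe ls; simp; omega
  · simp

def fix_markdown_tables_py_alt (text : String) : String :=
  PySem.Str.join "\n" (pvLoopB ((PySem.Str.split? text "\n").getD []))

-- ===== PRECONDITION & SPEC =====
def Spec_fix_markdown_tables_py (text : String) (out : String) : Prop := out = fix_markdown_tables_py_alt text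
instance (text : String) (out : String) : Decidable (Spec_fix_markdown_tables_py text out) := by unfold Spec_fix_markdown_tables_py; infer_instance

-- ===== CLAIM (what is proved, stated in full; the proofs are below) =====
def Claim_equal_fix_markdown_tables_py : Prop := ∀ (text : String), Dom_fix_markdown_tables_py text → Spec_fix_markdown_tables_py text (fix_markdown_tables_py text)

-- ===== LEMMAS AND PROOFS =====

-- middle representation: structural recursion carrying "previous line had a pipe"
def pvRecM : Bool → List String → List String
  | _, [] => []
  | pv, l :: ls =>
    l :: ((if pvPipe l && !pv then
             (match ls with
              | [] => []
              | n :: _ => if pvPipe n && !pvDash n && !pvDash l then [pvSep l] else [])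
           else []) ++ pvRecM (pvPipe l) ls)

-- per-item contribution of A's loop body
def pvGA (lines : List String) (p : Int × String) : List String :=
  p.2 :: (if PySem.Str.isIn "|" p.2 && decide (p.1 + 1 < (lines.length : Int)) then
            (if (!PySem.Str.isIn "|" (if p.1 > 0 then PySem.List.pyGetD lines (p.1 - 1) "" else ""))
                && PySem.Str.isIn "|" (PySem.List.pyGetD lines (p.1 + 1) "")
                && !PySem.Str.isIn "---" (PySem.List.pyGetD lines (p.1 + 1) "")
                && !PySem.Str.isIn "---" p.2
             then [pvSep p.2] else [])
          else [])

def pvPrev (lines : List String) (k : Nat) : Bool :=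
  pvPipe (if (k : Int) > 0 then PySem.List.pyGetD lines ((k : Int) - 1) "" else "")

lemma pvA_body (lines : List String) (acc : List String) (p : Int × String) :
    (let i := p.1
     let line := p.2
     let result := acc ++ [line]
     if PySem.Str.isIn "|" line && decide (i + 1 < (lines.length : Int)) then
       let next_line := PySem.List.pyGetD lines (i + 1) ""
       let prev_line := if i > 0 then PySem.List.pyGetD lines (i - 1) "" else ""
       let is_first_table_row := !PySem.Str.isIn "|" prev_line
       if is_first_table_row && PySem.Str.isIn "|" next_line
           && !PySem.Str.isIn "---" next_line && !PySem.Str.isIn "---" line then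
         result ++ [pvSep line]
       else result
     else result) = acc ++ pvGA lines p := by
  simp only [pvGA]
  split_ifs with h1 h2 <;> simp_all

lemma pvFlat_rec (lines : List String) :
    ∀ (suf : List String) (k : Nat), lines.drop k = suf →
      (PySem.List.enumerate suf (k : Int)).flatMap (pvGA lines) = pvRecM (pvPrev lines k) suf := by
  intro suf
  induction suf with
  | nil => intro k h; simp [pvRecM]
  | cons l suf' ih =>
    intro k h
    have hk : k < lines.length := by
      have := congrArg List.length h; simp at this; omega
    have hget : lines[k]? = some l := by
      have h0 : (lines.drop k)[0]? = some l := by rw [h]; rfl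
      simpa using h0
    have hdrop : lines.drop (k + 1) = suf' := by
      have h1 : (lines.drop k).drop 1 = suf' := by rw [h]; rfl
      simpa [List.drop_drop] using h1
    have hcast : ((k : Int) + 1) = ((k + 1 : Nat) : Int) := by push_cast; ring
    have hprev1 : pvPrev lines (k + 1) = pvPipe l := by
      have e : ((k + 1 : Nat) : Int) - 1 = ((k : Nat) : Int) := by push_cast; ring
      simp only [pvPrev, e, PySem.List.pyGetD_natCast]
      have : ((k + 1 : Nat) : Int) > 0 := by positivity
      simp [List.getD_eq_getElem?_getD, hget]
    rw [PySem.List.enumerate_cons, List.flatMap_cons, hcast, ih _ hdrop, hprev1]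
    show pvGA lines ((k : Int), l) ++ pvRecM (pvPipe l) suf' = _
    simp only [pvRecM, pvGA, List.cons_append]
    congr 1
    congr 1
    cases hsuf : suf' with
    | nil =>
      have hlen : lines.length ≤ k + 1 := by
        rw [hsuf] at hdrop
        have := congrArg List.length hdrop; simp at this; omega
      have hc : ¬ ((k : Int) + 1 < (lines.length : Int)) := by exact_mod_cast (by omega)
      simp [hc]
    | cons n t =>
      have hlen : k + 1 < lines.length := by
        rw [hsuf] at hdrop
        have := congrArg List.length hdrop; simp at this; omega
      have hc : ((k : Int) + 1 < (lines.length : Int)) := by exact_mod_cast (by omega)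
      have hgn : PySem.List.pyGetD lines ((k : Int) + 1) "" = n := by
        rw [hsuf] at hdrop
        have hn : lines[k+1]? = some n := by
          have h0 : (lines.drop (k+1))[0]? = some n := by rw [hdrop]; rfl
          simpa using h0
        rw [hcast, PySem.List.pyGetD_natCast]
        simp [List.getD_eq_getElem?_getD, hn]
      rw [hgn]
      simp only [hc, decide_true, Bool.and_true]
      cases h1 : pvPipe l <;> cases h2 : pvPrev lines k <;>
        cases h3 : pvPipe n <;> cases h4 : pvDash n <;> cases h5 : pvDash l <;>
        simp_all [pvPipe, pvDash, pvPrev]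

lemma pvEnum_flat (lines : List String) :
    (PySem.List.enumerate lines 0).flatMap (pvGA lines) = pvRecM false lines := by
  have h := pvFlat_rec lines lines 0 (by simp)
  have hp : pvPrev lines 0 = false := by simp [pvPrev, pvPipe]; decide
  simpa [hp] using h

lemma pvRecM_block (rest : List String) : ∀ (blk : List String), (∀ x ∈ blk, pvPipe x = true) →
    pvRecM true (blk ++ rest) = blk ++ pvRecM true rest := by
  intro blk
  induction blk with
  | nil => simp
  | cons b bs ih =>
    intro h
    have hb : pvPipe b = true := h b (by simp)
    simp only [List.cons_append, pvRecM, hb, Bool.not_true, Bool.and_false]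
    simp [ih (fun x hx => h x (by simp [hx]))]

lemma pvRecM_prev (pv pv' : Bool) (rest : List String)
    (h : ∀ r, rest.head? = some r → pvPipe r = false) :
    pvRecM pv rest = pvRecM pv' rest := by
  cases rest with
  | nil => rfl
  | cons r rs =>
    have hr : pvPipe r = false := h r rfl
    simp [pvRecM, hr]

lemma pvA_fold (lines acc : List String) :
    (PySem.List.enumerate lines 0).foldl (fun result p =>
      let i := p.1
      let line := p.2
      let result := result ++ [line]
      if PySem.Str.isIn "|" line && decide (i + 1 < (lines.length : Int)) then
        let next_line := PySem.List.pyGetD lines (i + 1) ""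
        let prev_line := if i > 0 then PySem.List.pyGetD lines (i - 1) "" else ""
        let is_first_table_row := !PySem.Str.isIn "|" prev_line
        if is_first_table_row && PySem.Str.isIn "|" next_line
            && !PySem.Str.isIn "---" next_line && !PySem.Str.isIn "---" line then
          result ++ [pvSep line]
        else result
      else result) acc
    = acc ++ (PySem.List.enumerate lines 0).flatMap (pvGA lines) := by
  rw [show (fun (result : List String) (p : Int × String) =>
        let i := p.1
        let line := p.2
        let result := result ++ [line]
        if PySem.Str.isIn "|" line && decide (i + 1 < (lines.length : Int)) then
          let next_line := PySem.List.pyGetD lines (i + 1) ""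
          let prev_line := if i > 0 then PySem.List.pyGetD lines (i - 1) "" else ""
          let is_first_table_row := !PySem.Str.isIn "|" prev_line
          if is_first_table_row && PySem.Str.isIn "|" next_line
              && !PySem.Str.isIn "---" next_line && !PySem.Str.isIn "---" line then
            result ++ [pvSep line]
          else result
        else result)
      = fun acc p => acc ++ pvGA lines p
    from funext fun acc => funext fun p => pvA_body lines acc p]
  exact PySem.List.foldl_append_eq_flatMap _ _ _

lemma pvLoopB_recM : ∀ ls : List String, pvLoopB ls = pvRecM false ls := by
  intro ls
  induction hn : ls.length using Nat.strong_induction_on generalizing ls with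
  | _ n ih =>
    cases ls with
    | nil => simp [pvLoopB, pvRecM]
    | cons l ls =>
      cases hp : pvPipe l with
      | false =>
        rw [pvLoopB]
        simp only [hp, Bool.false_eq_true, if_false]
        rw [ih ls.length (by simp [← hn]) ls rfl]
        simp [pvRecM, hp]
      | true =>
        have hrest := ih (ls.dropWhile pvPipe).length
          (by have := List.length_dropWhile_le pvPipe ls; simp [← hn]; omega)
          (ls.dropWhile pvPipe) rfl
        have hblk : ∀ x ∈ ls.takeWhile pvPipe, pvPipe x = true :=
          fun x hx => List.mem_takeWhile_imp hx
        have hhead : ∀ r, (ls.dropWhile pvPipe).head? = some r → pvPipe r = false := by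
          intro r hr
          have h2 := List.head?_dropWhile_not pvPipe ls
          rw [hr] at h2; simpa using h2
        have htail : pvRecM (pvPipe l) ls
            = ls.takeWhile pvPipe ++ pvRecM false (ls.dropWhile pvPipe) := by
          rw [hp]
          conv_lhs => rw [← List.takeWhile_append_dropWhile (p := pvPipe) (l := ls)]
          rw [pvRecM_block _ _ hblk, pvRecM_prev true false _ hhead]
        have hemit : (if pvPipe l && !false then
                        (match ls with
                         | [] => ([] : List String)
                         | n :: _ => if pvPipe n && !pvDash n && !pvDash l then [pvSep l] else [])
                      else [])
            = (match ls.takeWhile pvPipe with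
               | [] => ([] : List String)
               | second :: _ => if !pvDash l && !pvDash second then [pvSep l] else []) := by
          cases ls with
          | nil => simp [hp]
          | cons a as =>
            cases hpa : pvPipe a with
            | false =>
              simp [hp, hpa]
            | true =>
              simp only [hp, List.takeWhile_cons, hpa, Bool.not_false, Bool.and_true, if_true]
              cases h4 : pvDash a <;> cases h5 : pvDash l <;> simp
        rw [pvLoopB]
        simp only [hp, if_true]
        rw [hrest]
        show _ = pvRecM false (l :: ls)
        simp only [pvRecM]
        rw [htail, hemit]
        simp

-- ===== VERDICT (by name: the statement is the Claim_ definition above) =====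
theorem fix_markdown_tables_py_spec : Claim_equal_fix_markdown_tables_py := by
  intro text _
  unfold Spec_fix_markdown_tables_py fix_markdown_tables_py fix_markdown_tables_py_alt
  simp only [pvA_fold, pvLoopB_recM, pvEnum_flat, List.nil_append]
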